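-- pv_equiv track=rewrite | github.com/rhasanrakib/common-functions-ml | common.py | smoten_auto_up_sampling_count
-- ===== SOURCE A (Python) =====
-- def smoten_auto_up_sampling_count(upsampling_dict: dict):
--     values = list(upsampling_dict.values())
--
--     max_value = max(values)
--     values.remove(max_value)
--     second_max_value = max(values)
--     difference = abs(max_value-second_max_value)
--     if difference > 200:
--         num_sample = difference - 50
--     elif difference <= 200:
--         if difference > 150 and difference <= 200:
--             num_sample = 150
--         elif difference > 100 and difference <= 150:
--             num_sample = 100
--         elif difference > 50 and difference <= 100:
--             num_sample = 75
--         elif difference > 25 and difference <= 50: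
--             num_sample = 20
--         else:
--             num_sample = difference-5
--     re_dict = {}
--     for key, value in upsampling_dict.items():
--         if value == max_value:
--             pass
--         else:
--             re_dict[key] = value+num_sample
--     return upsampling_dict, re_dict
-- ===== SOURCE B (Python) =====
-- def smoten_auto_up_sampling_count(upsampling_dict: dict):
--     # single streaming pass keeps the running top-two values; no remove, no second scan
--     m1 = m2 = None
--     for v in upsampling_dict.values():
--         if m1 is None or v > m1:
--             m1, m2 = v, m1
--         elif m2 is None or v > m2:
--             m2 = v
--     difference = m1 - m2
--     num_sample = (difference - 50 if difference > 200 else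
--                   difference - 5 if difference <= 25 else
--                   20 if difference <= 50 else
--                   75 if difference <= 100 else
--                   100 if difference <= 150 else 150)
--     re_dict = {k: v + num_sample for k, v in upsampling_dict.items() if v != m1}
--     return upsampling_dict, re_dict
-- ===== Notes on version B (the rewrite author's own statement) =====
-- stated objective: alternative
-- what changed: A's three-pass max/remove/max scan is replaced by one streaming fold that maintains the running top-two values in an accumulator pair (no list mutation, no second scan), the five-branch if/elif ladder is collapsed into a reversed chained conditional, and the dict-building loop becomes a comprehension.
-- outside the precondition, e.g. on smoten_auto_up_sampling_count({}): A raises ValueError, B raises TypeError; on smoten_auto_up_sampling_count({'a': 1}): A raises ValueError, B raises TypeError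
import Mathlib
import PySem

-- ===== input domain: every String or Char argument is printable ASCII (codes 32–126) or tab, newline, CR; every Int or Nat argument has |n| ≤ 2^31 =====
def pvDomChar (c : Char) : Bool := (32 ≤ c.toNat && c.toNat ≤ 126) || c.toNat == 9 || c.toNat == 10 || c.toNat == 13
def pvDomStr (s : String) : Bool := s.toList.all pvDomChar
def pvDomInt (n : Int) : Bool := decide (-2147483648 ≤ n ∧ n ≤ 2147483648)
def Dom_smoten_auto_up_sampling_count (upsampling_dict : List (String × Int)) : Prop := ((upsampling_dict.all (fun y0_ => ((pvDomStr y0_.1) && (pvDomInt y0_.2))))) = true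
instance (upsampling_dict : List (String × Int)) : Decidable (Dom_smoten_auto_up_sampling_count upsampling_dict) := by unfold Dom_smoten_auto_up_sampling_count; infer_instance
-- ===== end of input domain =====

-- B replaces A's max / remove / max repeated scans by ONE streaming fold that maintains the
-- running top-two values in an accumulator pair, collapses the if/elif ladder into a
-- reversed chained conditional, and builds re_dict by a comprehension; objective: alternative.

-- ===== PORT A =====
def smoten_auto_up_sampling_count (upsampling_dict : List (String × Int)) : (List (String × Int)) × (List (String × Int)) :=
  let values := upsampling_dict.map Prod.snd
  match PySem.List.max? values (fun y => y) with
  | none => ([], [])                                  -- max([]) raises ValueError: outside Pre_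
  | some max_value =>
    match PySem.List.remove? values max_value with
    | none => ([], [])                                -- unreachable (max_value ∈ values)
    | some values' =>
      match PySem.List.max? values' (fun y => y) with
      | none => ([], [])                              -- max([]) raises ValueError: outside Pre_
      | some second_max_value =>
        let difference := |max_value - second_max_value|
        let num_sample : Int :=
          if difference > 200 then difference - 50
          else if difference ≤ 200 then
            if difference > 150 ∧ difference ≤ 200 then 150
            else if difference > 100 ∧ difference ≤ 150 then 100
            else if difference > 50 ∧ difference ≤ 100 then 75
            else if difference > 25 ∧ difference ≤ 50 then 20
            else difference - 5
          else 0                                      -- unreachable branch of the if/elif pair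
        let re_dict := upsampling_dict.foldl
          (fun d kv => if kv.2 == max_value then d else d.insert kv.1 (kv.2 + num_sample))
          (PySem.Dict.empty : PySem.Dict String Int)
        (upsampling_dict, re_dict.items)

-- ===== PORT B =====
-- one step of B's loop body: `if m1 is None or v > m1: … elif m2 is None or v > m2: …`
def pvTop2Step (p : Option Int × Option Int) (v : Int) : Option Int × Option Int :=
  if (match p.1 with | none => true | some a => decide (v > a)) then (some v, p.1)
  else if (match p.2 with | none => true | some a => decide (v > a)) then (p.1, some v)
  else p

def smoten_auto_up_sampling_count_alt (upsampling_dict : List (String × Int)) : (List (String × Int)) × (List (String × Int)) :=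
  match upsampling_dict.foldl (fun p kv => pvTop2Step p kv.2)
        ((none, none) : Option Int × Option Int) with
  | (some m1, some m2) =>
    let difference := m1 - m2
    let num_sample : Int :=
      if difference > 200 then difference - 50
      else if difference ≤ 25 then difference - 5
      else if difference ≤ 50 then 20
      else if difference ≤ 100 then 75
      else if difference ≤ 150 then 100
      else 150
    (upsampling_dict,
     (upsampling_dict.filter (fun kv => kv.2 != m1)).map (fun kv => (kv.1, kv.2 + num_sample)))
  | _ => ([], [])                                  -- m1 - m2 on None raises TypeError: outside Pre_

-- ===== PRECONDITION & SPEC =====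
-- Pre_ requires at least two entries (on fewer, A's max() of an empty remainder raises
-- ValueError and B's m1 - m2 raises TypeError) and distinct keys (a list with duplicate
-- keys cannot arise from a Python dict, whose keys are unique).
def Pre_smoten_auto_up_sampling_count (upsampling_dict : List (String × Int)) : Prop :=
  2 ≤ upsampling_dict.length ∧ (upsampling_dict.map Prod.fst).Nodup
instance (upsampling_dict : List (String × Int)) : Decidable (Pre_smoten_auto_up_sampling_count upsampling_dict) := by unfold Pre_smoten_auto_up_sampling_count; infer_instance
def pvWitness_smoten_auto_up_sampling_count : (List (String × Int)) := [("a", 10), ("b", 40)]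
def Spec_smoten_auto_up_sampling_count (upsampling_dict : List (String × Int)) (out : (List (String × Int)) × (List (String × Int))) : Prop := out = smoten_auto_up_sampling_count_alt upsampling_dict
instance (upsampling_dict : List (String × Int)) (out : (List (String × Int)) × (List (String × Int))) : Decidable (Spec_smoten_auto_up_sampling_count upsampling_dict out) := by unfold Spec_smoten_auto_up_sampling_count; infer_instance

-- ===== CLAIM (what is proved, stated in full; the proofs are below) =====
def Claim_equal_smoten_auto_up_sampling_count : Prop := ∀ (upsampling_dict : List (String × Int)), Dom_smoten_auto_up_sampling_count upsampling_dict → Pre_smoten_auto_up_sampling_count upsampling_dict → Spec_smoten_auto_up_sampling_count upsampling_dict (smoten_auto_up_sampling_count upsampling_dict)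

-- ===== LEMMAS AND PROOFS =====

-- characterisation of PySem max? (key = id) by membership + upper bound
lemma pv_max?_of (l : List Int) (m : Int) (hm : m ∈ l) (h : ∀ x ∈ l, x ≤ m) :
    PySem.List.max? l (fun y => y) = some m := by
  cases hq : PySem.List.max? l (fun y => y) with
  | none =>
    rw [PySem.List.max?_eq_none_iff] at hq
    simp [hq] at hm
  | some m' =>
    have h1 : m' ∈ l := PySem.List.max?_mem hq
    have h2 : m ≤ m' := PySem.List.max?_isMax hq m hm
    have h3 : m' ≤ m := h m' h1
    rw [le_antisymm h3 h2]

-- invariant of B's streaming fold: after any list of values, the state is (none,none) on [],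
-- (some a, none) on [a], and otherwise the max together with the max of the list minus one
-- occurrence of the max
lemma pv_top2_inv (l : List Int) :
    (l = [] ∧ l.foldl pvTop2Step (none, none) = (none, none)) ∨
    (∃ a, l = [a] ∧ l.foldl pvTop2Step (none, none) = (some a, none)) ∨
    (∃ M S, l.foldl pvTop2Step (none, none) = (some M, some S) ∧ S ≤ M ∧
      M ∈ l ∧ (∀ x ∈ l, x ≤ M) ∧ S ∈ l.erase M ∧ (∀ x ∈ l.erase M, x ≤ S)) := by
  induction l using List.reverseRecOn with
  | nil => exact Or.inl ⟨rfl, rfl⟩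
  | append_singleton l v ih =>
    rw [List.foldl_append, List.foldl_cons, List.foldl_nil]
    rcases ih with ⟨hl, hf⟩ | ⟨a, hl, hf⟩ | ⟨M, S, hf, hSM, hMmem, hMub, hSmem, hSub⟩
    · subst hl
      refine Or.inr (Or.inl ⟨v, rfl, ?_⟩)
      simp [hf, pvTop2Step]
    · subst hl
      refine Or.inr (Or.inr ?_)
      by_cases hv : v > a
      · refine ⟨v, a, ?_, le_of_lt hv, by simp, ?_, ?_, ?_⟩
        · simp [hf, pvTop2Step, hv]
        · intro x hx; simp at hx; rcases hx with h | h <;> omega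
        · have : a ≠ v := by omega
          simp [this]
        · intro x hx
          have : a ≠ v := by omega
          simp [this] at hx
          omega
      · refine ⟨a, v, ?_, by omega, by simp, ?_, ?_, ?_⟩
        · simp [hf, pvTop2Step, hv]
        · intro x hx; simp at hx; rcases hx with h | h <;> omega
        · simp
        · intro x hx; simp at hx; omega
    · refine Or.inr (Or.inr ?_)
      by_cases hv1 : v > M
      · have hvnotl : v ∉ l := fun h => absurd (hMub v h) (by omega)
        refine ⟨v, M, ?_, le_of_lt hv1, by simp, ?_, ?_, ?_⟩
        · simp [hf, pvTop2Step, hv1]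
        · intro x hx
          rcases List.mem_append.mp hx with h | h
          · exact le_trans (hMub x h) (le_of_lt hv1)
          · simp at h; omega
        · rw [List.erase_append_right _ hvnotl]; simp [hMmem]
        · intro x hx
          rw [List.erase_append_right _ hvnotl] at hx
          simp at hx
          exact hMub x hx
      · by_cases hv2 : v > S
        · refine ⟨M, v, ?_, by omega, List.mem_append_left _ hMmem, ?_, ?_, ?_⟩
          · simp [hf, pvTop2Step, hv1, hv2]
          · intro x hx
            rcases List.mem_append.mp hx with h | h
            · exact hMub x h
            · simp at h; omega
          · rw [List.erase_append_left _ hMmem]; simp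
          · intro x hx
            rw [List.erase_append_left _ hMmem] at hx
            rcases List.mem_append.mp hx with h | h
            · exact le_of_lt (lt_of_le_of_lt (hSub x h) hv2)
            · simp at h; omega
        · refine ⟨M, S, ?_, hSM, List.mem_append_left _ hMmem, ?_, ?_, ?_⟩
          · simp [hf, pvTop2Step, hv1, hv2]
          · intro x hx
            rcases List.mem_append.mp hx with h | h
            · exact hMub x h
            · simp at h; omega
          · rw [List.erase_append_left _ hMmem]; exact List.mem_append_left _ hSmem
          · intro x hx
            rw [List.erase_append_left _ hMmem] at hx
            rcases List.mem_append.mp hx with h | h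
            · exact hSub x h
            · simp at h; omega

-- the two num_sample ladders agree
lemma pv_num_sample_eq (d : Int) :
    (if d > 200 then d - 50
     else if d ≤ 200 then
       if d > 150 ∧ d ≤ 200 then 150
       else if d > 100 ∧ d ≤ 150 then (100 : Int)
       else if d > 50 ∧ d ≤ 100 then 75
       else if d > 25 ∧ d ≤ 50 then 20
       else d - 5
     else 0)
    = (if d > 200 then d - 50
       else if d ≤ 25 then d - 5
       else if d ≤ 50 then 20
       else if d ≤ 100 then 75
       else if d ≤ 150 then 100
       else 150) := by
  split_ifs <;> omega

-- the skip-the-max insert loop over distinct fresh keys appends the filtered, shifted items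
lemma pv_foldl_insert_items (l : List (String × Int)) (d : PySem.Dict String Int)
    (mx ns : Int) (hn : (l.map Prod.fst).Nodup)
    (h : ∀ kv ∈ l, d.contains kv.1 = false) :
    (l.foldl (fun d kv => if kv.2 == mx then d else d.insert kv.1 (kv.2 + ns)) d).items
      = d.items ++ (l.filter (fun kv => kv.2 != mx)).map (fun kv => (kv.1, kv.2 + ns)) := by
  induction l generalizing d with
  | nil => simp
  | cons kv t ih =>
    simp only [List.map_cons, List.nodup_cons] at hn
    have hmemt : ∀ x ∈ t, d.contains x.1 = false := fun x hx => h x (List.mem_cons_of_mem _ hx)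
    by_cases hkv : kv.2 = mx
    · have hb : (kv.2 == mx) = true := by simp [hkv]
      have hfb : (kv.2 != mx) = false := by simp [hkv]
      simp only [List.foldl_cons, List.filter_cons, hb, hfb, Bool.false_eq_true, if_true, if_false]
      exact ih d hn.2 hmemt
    · have hb : (kv.2 == mx) = false := by simp [hkv]
      have hfb : (kv.2 != mx) = true := by simp [hkv]
      simp only [List.foldl_cons, List.filter_cons, hb, hfb, Bool.false_eq_true, if_true, if_false,
        List.map_cons]
      rw [ih (d.insert kv.1 (kv.2 + ns)) hn.2 ?_]
      · rw [PySem.Dict.items_insert_of_not_contains d _ (h kv List.mem_cons_self)]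
        simp
      · intro x hx
        rw [PySem.Dict.contains_insert]
        have hne : x.1 ≠ kv.1 := by
          intro he
          exact hn.1 (he ▸ List.mem_map_of_mem hx)
        simp [hne, hmemt x hx]

-- ===== VERDICT (by name: the statement is the Claim_ definition above) =====
theorem smoten_auto_up_sampling_count_spec : Claim_equal_smoten_auto_up_sampling_count := by
  intro ud _ hpre
  obtain ⟨hlen, hnodup⟩ := hpre
  unfold Spec_smoten_auto_up_sampling_count smoten_auto_up_sampling_count smoten_auto_up_sampling_count_alt
  have hfold : ud.foldl (fun p kv => pvTop2Step p kv.2) ((none, none) : Option Int × Option Int)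
      = (ud.map Prod.snd).foldl pvTop2Step (none, none) := by rw [List.foldl_map]
  rcases pv_top2_inv (ud.map Prod.snd) with ⟨hl, _⟩ | ⟨a, hl, _⟩ | ⟨M, S, hf, hSM, hMmem, hMub, hSmem, hSub⟩
  · rw [List.map_eq_nil_iff] at hl; subst hl; simp at hlen
  · have := congrArg List.length hl; simp at this; omega
  · have hmx : PySem.List.max? (ud.map Prod.snd) (fun y => y) = some M := pv_max?_of _ M hMmem hMub
    have hrem : PySem.List.remove? (ud.map Prod.snd) M = some ((ud.map Prod.snd).erase M) :=
      PySem.List.remove?_eq_some_erase _ M hMmem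
    have hm2 : PySem.List.max? ((ud.map Prod.snd).erase M) (fun y => y) = some S :=
      pv_max?_of _ S hSmem hSub
    simp only [hmx, hrem, hm2, hfold, hf]
    have habs : |M - S| = M - S := abs_of_nonneg (by omega)
    rw [habs, pv_num_sample_eq (M - S),
      pv_foldl_insert_items ud PySem.Dict.empty M _ hnodup (fun kv _ => PySem.Dict.contains_empty ..)]
    simp [PySem.Dict.empty]
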